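-- pv_equiv track=rewrite | github.com/ranjodhsingh1729/DSA-2020 | Algorithms/Anagram.py | anagram1
-- ===== SOURCE A (Python) =====
-- def anagram1(word1, word2):
--     array = list(word2)
--     ok = True
--     pos1 = 0
--     while pos1 < len(word1) and ok:
--         pos2 = 0
--         faund = False
--         while pos2 < len(array) and not faund:
--             if word1[pos1] == array[pos2]:
--                 faund = True
--             else:
--                 pos2 += 1
--         if faund:
--             array[pos2] = None
--         else:
--             ok = False
--         pos1 += 1
--     return ok
-- ===== SOURCE B (Python) =====
-- def anagram1(word1, word2):
--     need = {}
--     for ch in word1: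
--         need[ch] = need.get(ch, 0) + 1
--     have = {}
--     for ch in word2:
--         have[ch] = have.get(ch, 0) + 1
--     return all(have.get(ch, 0) >= n for ch, n in need.items())
-- ===== Notes on version B (the rewrite author's own statement) =====
-- stated objective: faster
-- what changed: Replaces A's outer loop over word1 with an inner linear scan-and-mark of a copy of word2 by two frequency-table tallying passes followed by a single per-key comparison (sub-multiset test).
import Mathlib
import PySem

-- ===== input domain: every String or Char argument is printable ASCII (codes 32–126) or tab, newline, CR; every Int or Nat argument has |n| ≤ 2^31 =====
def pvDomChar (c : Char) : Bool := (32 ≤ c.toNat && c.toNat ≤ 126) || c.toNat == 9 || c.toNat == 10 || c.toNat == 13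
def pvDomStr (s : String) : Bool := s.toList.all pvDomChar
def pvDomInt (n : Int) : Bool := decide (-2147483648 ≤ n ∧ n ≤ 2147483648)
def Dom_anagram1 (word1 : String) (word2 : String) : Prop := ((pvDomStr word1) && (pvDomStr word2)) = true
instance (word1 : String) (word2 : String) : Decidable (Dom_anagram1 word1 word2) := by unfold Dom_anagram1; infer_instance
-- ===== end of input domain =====

-- B replaces A's nested scan-and-mark of a copy of word2 by two frequency tallies and one per-key comparison.

-- ===== PORT A =====
-- inner while loop: scan 'array' from position pos2 for the first cell equal to word1[pos1]
def anagram1Inner (c : Char) (arr : List (Option Char)) (pos2 : Nat) : Option Nat :=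
  match arr with
  | [] => none
  | a :: rest => if a = some c then some pos2 else anagram1Inner c rest (pos2 + 1)

-- outer while loop over word1 with state (array, ok); once ok=False the loop stops and False is returned
def anagram1Outer (chars : List Char) (arr : List (Option Char)) : Bool :=
  match chars with
  | [] => true
  | c :: rest =>
    match anagram1Inner c arr 0 with
    | some i => anagram1Outer rest (arr.set i none)   -- faund: array[pos2] = None
    | none => false                                    -- ok = False

def anagram1 (word1 : String) (word2 : String) : Bool :=
  anagram1Outer word1.toList (word2.toList.map some)

-- ===== PORT B =====
def anagram1_alt (word1 : String) (word2 : String) : Bool :=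
  let need := word1.toList.foldl (fun d ch => d.insert ch (d.getD ch (0 : Int) + 1)) PySem.Dict.empty
  let haveD := word2.toList.foldl (fun d ch => d.insert ch (d.getD ch (0 : Int) + 1)) PySem.Dict.empty
  need.items.all (fun p => haveD.getD p.1 (0 : Int) ≥ p.2)

-- ===== PRECONDITION & SPEC =====
def Spec_anagram1 (word1 : String) (word2 : String) (out : Bool) : Prop := out = anagram1_alt word1 word2
instance (word1 : String) (word2 : String) (out : Bool) : Decidable (Spec_anagram1 word1 word2 out) := by unfold Spec_anagram1; infer_instance

-- ===== CLAIM (what is proved, stated in full; the proofs are below) =====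
def Claim_equal_anagram1 : Prop := ∀ (word1 : String) (word2 : String), Dom_anagram1 word1 word2 → Spec_anagram1 word1 word2 (anagram1 word1 word2)

-- ===== LEMMAS AND PROOFS =====

-- the inner loop is a first-index search with an offset
theorem anagram1Inner_eq (c : Char) (arr : List (Option Char)) (p : Nat) :
    anagram1Inner c arr p = (arr.findIdx? (fun a => a = some c)).map (· + p) := by
  induction arr generalizing p with
  | nil => rfl
  | cons a rest ih =>
    simp only [anagram1Inner, List.findIdx?_cons]
    by_cases h : a = some c
    · simp [h]
    · rw [if_neg h, if_neg (by simpa using h), ih, Option.map_map]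
      cases rest.findIdx? (fun a => decide (a = some c)) with
      | none => rfl
      | some j =>
        simp only [Option.map_some, Function.comp_apply, Option.some.injEq]
        omega

-- a failed search means the character is absent from the live cells
theorem findIdx_none_not_mem (c : Char) (arr : List (Option Char))
    (h : arr.findIdx? (fun a => a = some c) = none) : c ∉ arr.reduceOption := by
  induction arr with
  | nil => simp
  | cons a rest ih =>
    rw [List.findIdx?_cons] at h
    by_cases ha : a = some c
    · rw [if_pos (by simpa using ha)] at h
      simp at h
    · rw [if_neg (by simpa using ha), Option.map_eq_none_iff] at h
      cases a with
      | none => rw [List.reduceOption_cons_of_none]; exact ih h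
      | some b =>
        rw [List.reduceOption_cons_of_some]
        intro hm
        rcases List.mem_cons.mp hm with rfl | hm'
        · exact ha rfl
        · exact ih h hm'

-- marking the found cell None removes the first occurrence of c from the live cells
theorem set_found_erase (c : Char) (arr : List (Option Char)) (i : Nat)
    (h : arr.findIdx? (fun a => a = some c) = some i) :
    c ∈ arr.reduceOption ∧ (arr.set i none).reduceOption = arr.reduceOption.erase c := by
  induction arr generalizing i with
  | nil => simp at h
  | cons a rest ih =>
    rw [List.findIdx?_cons] at h
    by_cases ha : a = some c
    · rw [if_pos (by simpa using ha), Option.some.injEq] at h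
      subst h
      subst ha
      constructor
      · rw [List.reduceOption_cons_of_some]; exact List.mem_cons_self
      · rw [List.set_cons_zero, List.reduceOption_cons_of_none,
          List.reduceOption_cons_of_some, List.erase_cons_head]
    · rw [if_neg (by simpa using ha), Option.map_eq_some_iff] at h
      obtain ⟨j, hj, hi⟩ := h
      subst hi
      obtain ⟨hmem, hset⟩ := ih j hj
      cases a with
      | none =>
        refine ⟨by rwa [List.reduceOption_cons_of_none], ?_⟩
        rw [List.set_cons_succ, List.reduceOption_cons_of_none,
          List.reduceOption_cons_of_none, hset]
      | some b =>
        have hbc : b ≠ c := fun hb => ha (by rw [hb])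
        refine ⟨by rw [List.reduceOption_cons_of_some]; exact List.mem_cons_of_mem _ hmem, ?_⟩
        rw [List.set_cons_succ, List.reduceOption_cons_of_some,
          List.reduceOption_cons_of_some, hset,
          List.erase_cons_tail (by simpa using hbc)]

-- cons-step of the sub-multiset relation
theorem cons_subperm_iff (c : Char) (l₁ l₂ : List Char) :
    (List.Subperm (c :: l₁) l₂) ↔ c ∈ l₂ ∧ List.Subperm l₁ (l₂.erase c) := by
  constructor
  · intro h
    have hc : c ∈ l₂ := h.subset List.mem_cons_self
    have hp := List.perm_cons_erase hc
    exact ⟨hc, (List.subperm_cons c).mp ((hp.subperm_left).mp h)⟩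
  · rintro ⟨hc, h⟩
    have hp := List.perm_cons_erase hc
    exact (hp.subperm_left).mpr ((List.subperm_cons c).mpr h)

-- A's loop decides the sub-multiset relation against the live cells of the array
theorem anagram1Outer_eq (chars : List Char) (arr : List (Option Char)) :
    anagram1Outer chars arr = decide (List.Subperm chars arr.reduceOption) := by
  induction chars generalizing arr with
  | nil => simp [anagram1Outer]
  | cons c rest ih =>
    simp only [anagram1Outer, anagram1Inner_eq]
    cases hf : arr.findIdx? (fun a => a = some c) with
    | none =>
      have hnm := findIdx_none_not_mem c arr hf
      simp only [Option.map_none]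
      symm
      rw [decide_eq_false_iff_not, cons_subperm_iff]
      exact fun hh => hnm hh.1
    | some i =>
      obtain ⟨hmem, hset⟩ := set_found_erase c arr i hf
      simp only [Option.map_some, Nat.add_zero, ih, hset]
      by_cases hs : List.Subperm rest (arr.reduceOption.erase c)
      · rw [decide_eq_true hs,
          decide_eq_true ((cons_subperm_iff c rest arr.reduceOption).mpr ⟨hmem, hs⟩)]
      · rw [decide_eq_false hs,
          decide_eq_false (fun hh => hs ((cons_subperm_iff c rest arr.reduceOption).mp hh).2)]

-- B decides the same relation by counts
theorem anagram1_alt_eq (word1 word2 : String) :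
    anagram1_alt word1 word2 = decide (List.Subperm word1.toList word2.toList) := by
  unfold anagram1_alt
  simp only [PySem.Dict.foldl_insert_getD_add_one_eq_counter, PySem.Dict.items_counter,
    List.all_map, PySem.Dict.getD_counter]
  by_cases h : List.Subperm word1.toList word2.toList
  · rw [decide_eq_true h, List.all_eq_true]
    intro c hc
    have := (List.subperm_ext_iff.mp h) c ((PySem.Set.mem_ofList _ _).mp hc)
    simpa using Int.ofNat_le.mpr this
  · rw [decide_eq_false h]
    rw [List.subperm_ext_iff] at h
    simp only [not_forall, not_le] at h
    obtain ⟨c, hc, hlt⟩ := h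
    rw [List.all_eq_false]
    refine ⟨c, (PySem.Set.mem_ofList _ _).mpr hc, ?_⟩
    simp only [Function.comp_apply, ge_iff_le, decide_eq_true_eq, not_le]
    exact_mod_cast hlt

-- the live cells of word2's initial array are word2's characters
theorem reduceOption_map_some (l : List Char) : (l.map some).reduceOption = l := by
  induction l with
  | nil => rfl
  | cons a rest ih => rw [List.map_cons, List.reduceOption_cons_of_some, ih]

-- ===== VERDICT (by name: the statement is the Claim_ definition above) =====
theorem anagram1_spec : Claim_equal_anagram1 := by
  intro word1 word2 _
  unfold Spec_anagram1 anagram1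
  rw [anagram1Outer_eq, anagram1_alt_eq, reduceOption_map_some]
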